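-- pv_equiv track=rewrite | github.com/Adharsha02/Altruisty-code | 3.py | min_of_max_in_subarrays
-- ===== SOURCE A (Python) =====
-- from collections import deque
--
-- def min_of_max_in_subarrays(arr, k):
--     n = len(arr)
--     if k > n:
--         return -1
--
--
--     dq = deque()
--     max_in_windows = []
--
--
--     for i in range(k):
--
--         while dq and arr[dq[-1]] <= arr[i]:
--             dq.pop()
--         dq.append(i)
--
--
--     for i in range(k, n):
--
--         max_in_windows.append(arr[dq[0]])
--
--
--         while dq and dq[0] <= i - k:
--             dq.popleft()
--
--
--         while dq and arr[dq[-1]] <= arr[i]: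
--             dq.pop()
--         dq.append(i)
--
--
--     max_in_windows.append(arr[dq[0]])
--
--
--     return min(max_in_windows)
-- ===== SOURCE B (Python) =====
-- def min_of_max_in_subarrays(arr, k):
--     n = len(arr)
--     if k > n:
--         return -1
--     return min(max(arr[i:i+k]) for i in range(n - k + 1))
-- ===== Notes on version B (the rewrite author's own statement) =====
-- stated objective: simpler
-- what changed: Replaces the maintained monotonic deque with a direct one-liner: the minimum over every length-k window of that window's maximum, via repeated slice scans.
import Mathlib
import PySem

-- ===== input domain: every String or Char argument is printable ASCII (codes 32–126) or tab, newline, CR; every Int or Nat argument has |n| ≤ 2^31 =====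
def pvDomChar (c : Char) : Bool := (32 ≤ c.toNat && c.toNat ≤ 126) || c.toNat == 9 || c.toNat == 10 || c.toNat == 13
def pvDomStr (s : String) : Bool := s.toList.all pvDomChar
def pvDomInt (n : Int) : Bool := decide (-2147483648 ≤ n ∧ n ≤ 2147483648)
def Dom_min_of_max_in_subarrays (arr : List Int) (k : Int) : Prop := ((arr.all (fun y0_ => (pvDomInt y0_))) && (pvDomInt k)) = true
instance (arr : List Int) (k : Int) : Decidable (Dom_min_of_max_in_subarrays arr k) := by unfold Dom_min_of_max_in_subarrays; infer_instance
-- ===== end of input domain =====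

-- B replaces A's monotonic deque with the plain minimum over every length-k window of that
-- window's maximum (one line, repeated slice scans); objective: simpler, not faster.

-- ===== PORT A =====
-- arr[j] for an index the loops produced (always in range on admitted inputs; .getD 0 is never hit there)
def pvVal (arr : List Int) (j : Int) : Int := (PySem.List.pyGet? arr j).getD 0

-- The deque is stored NEWEST-FIRST: list head = Python dq[-1] (right end), list last = Python dq[0] (left end).
-- 'while dq and arr[dq[-1]] <= arr[i]: dq.pop()'
def pvPop (arr : List Int) (x : Int) : List Int → List Int
  | [] => []
  | j :: rest => if pvVal arr j ≤ x then pvPop arr x rest else j :: rest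

-- '… dq.pop(); dq.append(i)' — the pop-while followed by the append of i
def pvPush (arr : List Int) (dq : List Int) (i : Int) : List Int := i :: pvPop arr (pvVal arr i) dq

-- 'while dq and dq[0] <= bound: dq.popleft()'  (dq[0] is the LAST element of our list, hence dropLast;
-- the loop guard 'dq and dq[0] <= bound' is exactly: the last element exists and is ≤ bound)
def pvPopLeft (bound : Int) (dq : List Int) : List Int :=
  if h : dq.getLast?.any (fun j => decide (j ≤ bound)) = true then pvPopLeft bound dq.dropLast
  else dq
termination_by dq.length
decreasing_by
  have hne : dq ≠ [] := by
    intro hnil; rw [hnil] at h; simp at h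
  have : 0 < dq.length := List.length_pos_iff.mpr hne
  simp [List.length_dropLast]; omega

-- body of the second 'for i in range(k, n)' loop; state = (deque, max_in_windows)
def pvStep (arr : List Int) (k : Int) (st : List Int × List Int) (i : Int) : List Int × List Int :=
  let maxs := st.2 ++ [pvVal arr (st.1.getLast?.getD 0)]   -- max_in_windows.append(arr[dq[0]])
  let dq := pvPopLeft (i - k) st.1                          -- while dq and dq[0] <= i - k: dq.popleft()
  (pvPush arr dq i, maxs)                                   -- pop-while on the right, then dq.append(i)

def min_of_max_in_subarrays (arr : List Int) (k : Int) : Int :=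
  let n : Int := arr.length
  if k > n then -1
  else
    let dq := (PySem.List.pyRange 0 k 1).foldl (pvPush arr) []          -- for i in range(k): …
    let st := (PySem.List.pyRange k n 1).foldl (pvStep arr k) (dq, [])  -- for i in range(k, n): …
    let maxs := st.2 ++ [pvVal arr (st.1.getLast?.getD 0)]              -- max_in_windows.append(arr[dq[0]])
    (PySem.List.min? maxs (fun y => y)).getD 0                          -- min(max_in_windows); nonempty under Pre_

-- ===== PORT B =====
def min_of_max_in_subarrays_alt (arr : List Int) (k : Int) : Int :=
  let n : Int := arr.length
  if k > n then -1
  else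
    (PySem.List.min?
      ((PySem.List.pyRange 0 (n - k + 1) 1).map
        (fun i => (PySem.List.max? (PySem.List.slice arr (some i) (some (i + k))) (fun y => y)).getD 0))
      (fun y => y)).getD 0

-- ===== PRECONDITION & SPEC =====
-- Pre_ excludes k ≤ 0, on which A raises IndexError (empty deque) — B raises ValueError there too.
def Pre_min_of_max_in_subarrays (arr : List Int) (k : Int) : Prop := 1 ≤ k
instance (arr : List Int) (k : Int) : Decidable (Pre_min_of_max_in_subarrays arr k) := by
  unfold Pre_min_of_max_in_subarrays; infer_instance

def pvWitness_min_of_max_in_subarrays : List Int × Int := ([1, 3, 2], 2)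

def Spec_min_of_max_in_subarrays (arr : List Int) (k : Int) (out : Int) : Prop := out = min_of_max_in_subarrays_alt arr k
instance (arr : List Int) (k : Int) (out : Int) : Decidable (Spec_min_of_max_in_subarrays arr k out) := by unfold Spec_min_of_max_in_subarrays; infer_instance

-- ===== CLAIM (what is proved, stated in full; the proofs are below) =====
def Claim_equal_min_of_max_in_subarrays : Prop := ∀ (arr : List Int) (k : Int), Dom_min_of_max_in_subarrays arr k → Pre_min_of_max_in_subarrays arr k → Spec_min_of_max_in_subarrays arr k (min_of_max_in_subarrays arr k)

-- ===== LEMMAS AND PROOFS =====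

-- max of the window starting at s (what one entry of B's mapped list computes)
def pvWmax (arr : List Int) (k : Int) (s : Int) : Int :=
  (PySem.List.max? (PySem.List.slice arr (some s) (some (s + k))) (fun y => y)).getD 0

-- deque invariant for window (lo, hi]
def pvInv (arr : List Int) (lo hi : Int) (dq : List Int) : Prop :=
  (∀ j ∈ dq, lo < j ∧ j ≤ hi ∧ 0 ≤ j ∧ j < (arr.length : Int)) ∧
  dq.Pairwise (fun a b => b < a ∧ pvVal arr a < pvVal arr b) ∧
  (∀ m : Int, lo < m → m ≤ hi → ∃ j ∈ dq, m ≤ j ∧ pvVal arr m ≤ pvVal arr j)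

theorem pvInv_nil (arr : List Int) (lo : Int) : pvInv arr lo lo [] := by
  refine ⟨by simp, by simp, ?_⟩
  intro m h1 h2; omega

theorem pvPop_sublist (arr : List Int) (x : Int) (dq : List Int) :
    (pvPop arr x dq).Sublist dq := by
  induction dq with
  | nil => simp [pvPop]
  | cons j rest ih =>
    simp only [pvPop]
    split
    · exact ih.trans (List.sublist_cons_self _ _)
    · exact List.Sublist.refl _

theorem pvPop_drop (arr : List Int) (x : Int) (dq : List Int) :
    ∀ j ∈ dq, j ∈ pvPop arr x dq ∨ pvVal arr j ≤ x := by
  induction dq with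
  | nil => simp
  | cons a rest ih =>
    intro j hj
    simp only [pvPop]
    rcases List.mem_cons.mp hj with rfl | hj'
    · split
      · right; assumption
      · left; simp
    · split
      · exact ih j hj'
      · left; exact List.mem_cons_of_mem _ hj'

theorem pvPop_head (arr : List Int) (x : Int) (dq : List Int) :
    pvPop arr x dq = [] ∨ ∃ h t, pvPop arr x dq = h :: t ∧ x < pvVal arr h := by
  induction dq with
  | nil => simp [pvPop]
  | cons a rest ih =>
    simp only [pvPop]
    split
    · exact ih
    · right; exact ⟨a, rest, rfl, by omega⟩

-- push lemma: one 'pop-while; append(i)' extends the window from (lo, i-1] to (lo, i]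
theorem pvInv_push (arr : List Int) (lo i : Int) (dq : List Int)
    (hInv : pvInv arr lo (i - 1) dq) (hlo : lo < i) (h0 : 0 ≤ i) (hn : i < (arr.length : Int)) :
    pvInv arr lo i (pvPush arr dq i) := by
  obtain ⟨hB, hP, hD⟩ := hInv
  have hsub := pvPop_sublist arr (pvVal arr i) dq
  refine ⟨?_, ?_, ?_⟩
  · intro j hj
    rcases List.mem_cons.mp hj with rfl | hj'
    · exact ⟨hlo, le_refl _, h0, hn⟩
    · have := hB j (hsub.mem hj')
      exact ⟨this.1, by omega, this.2.2⟩
  · refine List.pairwise_cons.mpr ⟨?_, hP.sublist hsub⟩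
    intro b hb
    have hbB := hB b (hsub.mem hb)
    refine ⟨by omega, ?_⟩
    rcases pvPop_head arr (pvVal arr i) dq with hnil | ⟨h, t, heq, hlt⟩
    · rw [hnil] at hb; simp at hb
    · rw [heq] at hb
      rcases List.mem_cons.mp hb with rfl | hb'
      · exact hlt
      · have hPh := (hP.sublist hsub)
        rw [heq] at hPh
        have := (List.pairwise_cons.mp hPh).1 b hb'
        omega
  · intro m h1 h2
    by_cases hm : m ≤ i - 1
    · obtain ⟨j, hj, hmj, hval⟩ := hD m h1 hm
      rcases pvPop_drop arr (pvVal arr i) dq j hj with hkeep | hle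
      · exact ⟨j, List.mem_cons_of_mem _ hkeep, hmj, hval⟩
      · exact ⟨i, List.mem_cons_self, by omega, by omega⟩
    · have hmi : m = i := by omega
      exact ⟨i, List.mem_cons_self, by omega, by rw [hmi]⟩

theorem pvPopLeft_prefix (bound : Int) (dq : List Int) :
    (pvPopLeft bound dq).IsPrefix dq := by
  induction dq using pvPopLeft.induct bound with
  | case1 dq h ih =>
    rw [pvPopLeft, dif_pos h]
    exact ih.trans (List.dropLast_prefix dq)
  | case2 dq h =>
    rw [pvPopLeft, dif_neg h]

theorem pvPopLeft_keep (bound : Int) (dq : List Int) (j : Int)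
    (hj : j ∈ dq) (hgt : bound < j) : j ∈ pvPopLeft bound dq := by
  induction dq using pvPopLeft.induct bound with
  | case1 dq h ih =>
    rw [pvPopLeft, dif_pos h]
    have hne : dq ≠ [] := by intro hnil; rw [hnil] at h; simp at h
    have hle : dq.getLast hne ≤ bound := by
      rw [List.getLast?_eq_some_getLast hne] at h
      simpa using h
    refine ih ?_
    rw [← List.dropLast_append_getLast hne] at hj
    rcases List.mem_append.mp hj with h1 | h1
    · exact h1
    · exfalso
      simp at h1
      omega
  | case2 dq h =>
    rw [pvPopLeft, dif_neg h]
    exact hj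

-- the result of pvPopLeft is empty or ends in an element above the bound (directly from its definition)
theorem pvPopLeft_last (bound : Int) (dq : List Int) :
    pvPopLeft bound dq = [] ∨
      ∃ hne : pvPopLeft bound dq ≠ [], bound < (pvPopLeft bound dq).getLast hne := by
  induction dq using pvPopLeft.induct bound with
  | case1 dq h ih =>
    rw [pvPopLeft, dif_pos h]
    exact ih
  | case2 dq h =>
    rw [pvPopLeft, dif_neg h]
    by_cases hne : dq = []
    · left; exact hne
    · right
      refine ⟨hne, ?_⟩
      rw [List.getLast?_eq_some_getLast hne] at h
      simp at h
      omega

-- a Pairwise list relates every member to its last element (or equals it)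
theorem pairwise_getLast {R : Int → Int → Prop} (l : List Int) (hP : l.Pairwise R)
    (hne : l ≠ []) (x : Int) (hx : x ∈ l) :
    x = l.getLast hne ∨ R x (l.getLast hne) := by
  induction l with
  | nil => simp at hx
  | cons a t ih =>
    rcases List.pairwise_cons.mp hP with ⟨ha, ht⟩
    by_cases hT : t = []
    · subst hT
      simp at hx
      left; simp [hx]
    · rw [List.getLast_cons hT]
      rcases List.mem_cons.mp hx with rfl | hx'
      · right; exact ha _ (List.getLast_mem hT)
      · exact ih ht hT hx'

-- descending list: if the last element is > bound, every element is
theorem pvDesc_all_gt (dq : List Int) (arr : List Int)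
    (hP : dq.Pairwise (fun a b => b < a ∧ pvVal arr a < pvVal arr b)) (hne : dq ≠ [])
    (bound : Int) (hlast : bound < dq.getLast hne) : ∀ j ∈ dq, bound < j := by
  intro j hj
  rcases pairwise_getLast dq hP hne j hj with h | h
  · omega
  · have := h.1; omega

theorem pvInv_popLeft (arr : List Int) (lo hi lo' : Int) (dq : List Int)
    (hInv : pvInv arr lo hi dq) (h : lo ≤ lo') :
    pvInv arr lo' hi (pvPopLeft lo' dq) := by
  obtain ⟨hB, hP, hD⟩ := hInv
  have hpre := pvPopLeft_prefix lo' dq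
  have hsub : (pvPopLeft lo' dq).Sublist dq := hpre.sublist
  have hP' := hP.sublist hsub
  have hgt : ∀ j ∈ pvPopLeft lo' dq, lo' < j := by
    rcases pvPopLeft_last lo' dq with hnil | ⟨hne, hlast⟩
    · rw [hnil]; intro j hj; simp at hj
    · exact pvDesc_all_gt _ arr hP' hne lo' hlast
  refine ⟨?_, hP', ?_⟩
  · intro j hj
    have := hB j (hsub.mem hj)
    exact ⟨hgt j hj, this.2⟩
  · intro m h1 h2
    obtain ⟨j, hj, hmj, hval⟩ := hD m (by omega) h2
    exact ⟨j, pvPopLeft_keep lo' dq j hj (by omega), hmj, hval⟩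

-- membership in a slice arr[a:b] (0 ≤ a ≤ b ≤ len) is exactly the values pvVal arr m, a ≤ m < b
theorem mem_slice_iff (arr : List Int) (a b x : Int)
    (ha : 0 ≤ a) (hb : b ≤ (arr.length : Int)) (hab : a ≤ b) :
    x ∈ PySem.List.slice arr (some a) (some b) ↔
      ∃ m : Int, a ≤ m ∧ m < b ∧ x = pvVal arr m := by
  rw [PySem.List.slice_toNat arr ha (by omega)]
  have hval : ∀ (u : Nat) (hu : u < arr.length), pvVal arr (u : Int) = arr[u]'hu := by
    intro u hu
    simp [pvVal, PySem.List.pyGet?_natCast, List.getElem?_eq_getElem hu]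
  constructor
  · intro hx
    obtain ⟨i, hi, hgi⟩ := List.getElem_of_mem hx
    have hlen : i < b.toNat - a.toNat ∧ a.toNat + i < arr.length := by
      simp [List.length_take, List.length_drop] at hi
      omega
    rw [List.getElem_take, List.getElem_drop] at hgi
    refine ⟨((a.toNat + i : Nat) : Int), by omega, by omega, ?_⟩
    rw [hval _ hlen.2, hgi]
  · rintro ⟨m, h1, h2, rfl⟩
    have hmlen : m.toNat < arr.length := by omega
    have hma : m = ((a.toNat + (m.toNat - a.toNat) : Nat) : Int) := by omega
    rw [hma, hval _ (by omega)]
    refine List.mem_iff_getElem.mpr ⟨m.toNat - a.toNat, ?_, ?_⟩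
    · simp [List.length_take, List.length_drop]
      omega
    · rw [List.getElem_take, List.getElem_drop]

-- extraction: under the invariant the value at Python's dq[0] is the window maximum
theorem pvInv_extract (arr : List Int) (lo hi : Int) (dq : List Int)
    (hInv : pvInv arr lo hi dq) (hwin : lo < hi) (hlo : -1 ≤ lo) (hhi : hi < (arr.length : Int)) :
    pvVal arr (dq.getLast?.getD 0) =
      (PySem.List.max? (PySem.List.slice arr (some (lo + 1)) (some (hi + 1))) (fun y => y)).getD 0 := by
  obtain ⟨hB, hP, hD⟩ := hInv
  obtain ⟨j1, hj1, _, _⟩ := hD hi (by omega) (le_refl _)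
  have hne : dq ≠ [] := by intro hnil; rw [hnil] at hj1; simp at hj1
  have hlast : dq.getLast?.getD 0 = dq.getLast hne := by
    rw [List.getLast?_eq_some_getLast hne]; rfl
  set j0 := dq.getLast hne with hj0
  have hj0mem : j0 ∈ dq := List.getLast_mem hne
  have hj0B := hB j0 hj0mem
  -- every deque value is ≤ the last one's value
  have hmax : ∀ j ∈ dq, pvVal arr j ≤ pvVal arr j0 := by
    intro j hj
    rcases pairwise_getLast dq hP hne j hj with h | h
    · rw [h]
    · exact le_of_lt h.2
  -- the window max characterised through the slice
  have hj0slice : pvVal arr j0 ∈ PySem.List.slice arr (some (lo + 1)) (some (hi + 1)) := by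
    rw [mem_slice_iff arr _ _ _ (by omega) (by omega) (by omega)]
    exact ⟨j0, by omega, by omega, rfl⟩
  have hub : ∀ x ∈ PySem.List.slice arr (some (lo + 1)) (some (hi + 1)), x ≤ pvVal arr j0 := by
    intro x hx
    rw [mem_slice_iff arr _ _ _ (by omega) (by omega) (by omega)] at hx
    obtain ⟨m, h1, h2, rfl⟩ := hx
    obtain ⟨j, hj, _, hval⟩ := hD m (by omega) (by omega)
    exact le_trans hval (hmax j hj)
  obtain ⟨v, hv⟩ : ∃ v, PySem.List.max? (PySem.List.slice arr (some (lo + 1)) (some (hi + 1))) (fun y => y) = some v := by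
    cases hcase : PySem.List.max? (PySem.List.slice arr (some (lo + 1)) (some (hi + 1))) (fun y => y) with
    | none =>
      exfalso
      rw [PySem.List.max?_eq_none_iff] at hcase
      rw [hcase] at hj0slice
      simp at hj0slice
    | some v => exact ⟨v, rfl⟩
  rw [hv]
  have hvmem : v ∈ PySem.List.slice arr (some (lo + 1)) (some (hi + 1)) := PySem.List.max?_mem hv
  have hvmax := PySem.List.max?_isMax hv
  have h1 : v ≤ pvVal arr j0 := hub v hvmem
  have h2 : pvVal arr j0 ≤ v := hvmax _ hj0slice
  rw [hlast]
  simp only [Option.getD_some]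
  omega

-- loop 1: pushing range(i, k) keeps the prefix invariant
theorem pvLoop1 (arr : List Int) (k : Int) (hk : k ≤ (arr.length : Int)) :
    ∀ (c : Nat) (i : Int) (dq : List Int), 0 ≤ i → i + c = k →
      pvInv arr (-1) (i - 1) dq →
      pvInv arr (-1) (k - 1) ((PySem.List.pyRange i k 1).foldl (pvPush arr) dq) := by
  intro c
  induction c with
  | zero =>
    intro i dq h0 hik hInv
    have : i = k := by omega
    subst this
    rw [PySem.List.pyRange_one_eq_nil (le_refl _)]
    simpa using hInv
  | succ c ih =>
    intro i dq h0 hik hInv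
    have hik' : i < k := by omega
    rw [PySem.List.pyRange_one_cons hik']
    simp only [List.foldl_cons]
    refine ih (i + 1) _ (by omega) (by omega) ?_
    have := pvInv_push arr (-1) i dq hInv (by omega) h0 (by omega)
    simpa using this

-- loop 2: folding pvStep over range(i, n) appends exactly the window maxima
theorem pvLoop2 (arr : List Int) (k : Int) (hk : 1 ≤ k) :
    ∀ (c : Nat) (i : Int) (dq maxs : List Int), k ≤ i → i + c = (arr.length : Int) →
      pvInv arr (i - k - 1) (i - 1) dq →
      ∃ dq', pvInv arr ((arr.length : Int) - k - 1) ((arr.length : Int) - 1) dq' ∧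
        (PySem.List.pyRange i (arr.length : Int) 1).foldl (pvStep arr k) (dq, maxs)
          = (dq', maxs ++ (PySem.List.pyRange (i - k) ((arr.length : Int) - k) 1).map (pvWmax arr k)) := by
  intro c
  induction c with
  | zero =>
    intro i dq maxs hki hin hInv
    have : i = (arr.length : Int) := by omega
    refine ⟨dq, by rw [← this]; exact hInv, ?_⟩
    rw [PySem.List.pyRange_one_eq_nil (by omega), PySem.List.pyRange_one_eq_nil (by omega)]
    simp
  | succ c ih =>
    intro i dq maxs hki hin hInv
    have hiltn : i < (arr.length : Int) := by omega
    rw [PySem.List.pyRange_one_cons hiltn]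
    simp only [List.foldl_cons]
    -- unfold one pvStep
    have hrec : pvVal arr (dq.getLast?.getD 0) = pvWmax arr k (i - k) := by
      have h := pvInv_extract arr (i - k - 1) (i - 1) dq hInv (by omega) (by omega) (by omega)
      have e1 : i - k - 1 + 1 = i - k := by ring
      have e2 : i - 1 + 1 = i - k + k := by ring
      rw [h, e1, e2]
      rfl
    have hInv1 : pvInv arr (i - k) (i - 1) (pvPopLeft (i - k) dq) :=
      pvInv_popLeft arr (i - k - 1) (i - 1) (i - k) dq hInv (by omega)
    have hInv2 : pvInv arr ((i + 1) - k - 1) ((i + 1) - 1) (pvPush arr (pvPopLeft (i - k) dq) i) := by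
      have : pvInv arr (i - k) i (pvPush arr (pvPopLeft (i - k) dq) i) :=
        pvInv_push arr (i - k) i _ hInv1 (by omega) (by omega) hiltn
      have e1 : (i + 1) - k - 1 = i - k := by ring
      have e2 : (i + 1) - 1 = i := by ring
      rw [e1, e2]
      exact this
    obtain ⟨dq', hInv', heq⟩ := ih (i + 1) _ (maxs ++ [pvVal arr (dq.getLast?.getD 0)]) (by omega) (by omega) hInv2
    refine ⟨dq', hInv', ?_⟩
    show (PySem.List.pyRange (i + 1) (arr.length : Int) 1).foldl (pvStep arr k)
        (pvStep arr k (dq, maxs) i) = _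
    have hstep : pvStep arr k (dq, maxs) i
        = (pvPush arr (pvPopLeft (i - k) dq) i, maxs ++ [pvVal arr (dq.getLast?.getD 0)]) := rfl
    rw [hstep, heq, hrec]
    rw [PySem.List.pyRange_one_cons (show i - k < (arr.length : Int) - k by omega)]
    have e3 : i - k + 1 = (i + 1) - k := by ring
    rw [List.map_cons, ← e3]
    simp

-- ===== VERDICT (by name: the statement is the Claim_ definition above) =====
theorem min_of_max_in_subarrays_spec : Claim_equal_min_of_max_in_subarrays := by
  intro arr k _ hPre
  unfold Spec_min_of_max_in_subarrays
  unfold min_of_max_in_subarrays min_of_max_in_subarrays_alt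
  simp only []
  by_cases hkn : k > (arr.length : Int)
  · rw [if_pos hkn, if_pos hkn]
  · rw [if_neg hkn, if_neg hkn]
    rw [not_lt] at hkn
    have hk1 : 1 ≤ k := hPre
    -- loop 1
    have hInv0 : pvInv arr (-1) (-1) [] := pvInv_nil arr (-1)
    have hL1 : pvInv arr (-1) (k - 1) ((PySem.List.pyRange 0 k 1).foldl (pvPush arr) []) := by
      refine pvLoop1 arr k hkn k.toNat 0 [] (le_refl _) (by omega) ?_
      simpa using hInv0
    -- loop 2
    have hInvStart : pvInv arr (k - k - 1) (k - 1) ((PySem.List.pyRange 0 k 1).foldl (pvPush arr) []) := by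
      have : k - k - 1 = (-1 : Int) := by ring
      rw [this]; exact hL1
    obtain ⟨dq', hInv', heq⟩ := pvLoop2 arr k hk1 ((arr.length : Int) - k).toNat k
      ((PySem.List.pyRange 0 k 1).foldl (pvPush arr) []) [] (le_refl _) (by omega) hInvStart
    rw [show k - k = (0 : Int) by ring] at heq
    rw [heq]
    simp only [List.nil_append]
    have hfinal : pvVal arr (dq'.getLast?.getD 0) = pvWmax arr k ((arr.length : Int) - k) := by
      have h := pvInv_extract arr ((arr.length : Int) - k - 1) ((arr.length : Int) - 1) dq' hInv'
        (by omega) (by omega) (by omega)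
      have e1 : (arr.length : Int) - k - 1 + 1 = (arr.length : Int) - k := by ring
      have e2 : (arr.length : Int) - 1 + 1 = (arr.length : Int) - k + k := by ring
      rw [h, e1, e2]
      rfl
    rw [hfinal]
    have hrange : (PySem.List.pyRange 0 ((arr.length : Int) - k) 1).map (pvWmax arr k) ++ [pvWmax arr k ((arr.length : Int) - k)]
        = (PySem.List.pyRange 0 ((arr.length : Int) - k + 1) 1).map (pvWmax arr k) := by
      rw [PySem.List.pyRange_one_succ_right (by omega)]
      simp
    rw [hrange]
    rfl
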